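-- pv_equiv track=rewrite | github.com/chengyu2000311/Japanese | test.py | safe_solution
-- ===== SOURCE A (Python) =====
-- def safe_solution(f, cafe):
--     from collections import defaultdict, Counter
--     graph = defaultdict(Counter)
--     for i in range(len(f)):
--         fra = f[i]
--         safe = cafe[i]
--         graph[fra][safe] += 1
--
--     res = 0
--     for count in graph.values():
--         unsafe = count[0]
--         safe = count[1]
--         res += safe * unsafe + safe * (safe - 1) // 2
--
--     return res
-- ===== SOURCE B (Python) =====
-- def safe_solution(f, cafe):
--     # Single pass: for each element, count the pairs it closes with earlier
--     # same-key elements; {key: (safe_seen, unsafe_seen)} replaces the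
--     # grouped-Counter + closed-formula second loop of the original.
--     counts = {}
--     res = 0
--     for i in range(len(f)):
--         s = cafe[i]
--         sf, uf = counts.get(f[i], (0, 0))
--         if s == 1:
--             res += sf + uf
--             counts[f[i]] = (sf + 1, uf)
--         elif s == 0:
--             res += sf
--             counts[f[i]] = (sf, uf + 1)
--     return res
-- ===== Notes on version B (the rewrite author's own statement) =====
-- stated objective: faster
-- what changed: replaces the two-pass grouped defaultdict(Counter) + per-key pair-formula computation by a single pass that, per element, adds the number of earlier same-key elements it forms a counted pair with, tracked in a plain dict of running (safe,unsafe) tuples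
import Mathlib
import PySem

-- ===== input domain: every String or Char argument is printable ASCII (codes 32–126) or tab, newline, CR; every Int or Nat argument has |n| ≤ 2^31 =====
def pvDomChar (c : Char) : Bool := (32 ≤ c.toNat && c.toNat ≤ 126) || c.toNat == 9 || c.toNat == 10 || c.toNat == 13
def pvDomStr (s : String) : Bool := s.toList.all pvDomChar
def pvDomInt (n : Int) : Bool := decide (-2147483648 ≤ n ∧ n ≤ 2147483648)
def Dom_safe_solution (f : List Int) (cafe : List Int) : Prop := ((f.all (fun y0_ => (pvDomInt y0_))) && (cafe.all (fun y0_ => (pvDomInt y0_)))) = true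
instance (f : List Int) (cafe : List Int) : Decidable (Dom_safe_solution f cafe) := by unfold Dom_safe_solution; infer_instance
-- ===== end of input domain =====

-- B replaces A's two passes (group into defaultdict(Counter), then sum a pair formula per
-- key) by one pass keeping running (safe,unsafe) counts per key; same O(n), measurably
-- faster by a constant factor (no Counter/defaultdict machinery).

-- ===== PORT A =====
def safe_solution (f : List Int) (cafe : List Int) : Int :=
  let graph : PySem.Dict Int (PySem.Dict Int Int) :=
    (PySem.List.pyRange 0 (f.length : Int) 1).foldl
      (fun g i =>
        let fra := PySem.List.pyGetD f i 0
        let safe := PySem.List.pyGetD cafe i 0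
        g.modify fra PySem.Dict.empty (fun c => c.modify safe 0 (· + 1)))
      PySem.Dict.empty
  graph.values.foldl
    (fun res count =>
      res + (count.getD 1 0 * count.getD 0 0 +
        PySem.Int.floordiv (count.getD 1 0 * (count.getD 1 0 - 1)) 2)) 0

-- ===== PORT B =====
def safe_solution_alt (f : List Int) (cafe : List Int) : Int :=
  ((PySem.List.pyRange 0 (f.length : Int) 1).foldl
    (fun st i =>
      let s := PySem.List.pyGetD cafe i 0
      let p := st.1.getD (PySem.List.pyGetD f i 0) (0, 0)
      if s = 1 then (st.1.insert (PySem.List.pyGetD f i 0) (p.1 + 1, p.2), st.2 + p.1 + p.2)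
      else if s = 0 then (st.1.insert (PySem.List.pyGetD f i 0) (p.1, p.2 + 1), st.2 + p.1)
      else st)
    ((PySem.Dict.empty : PySem.Dict Int (Int × Int)), (0 : Int))).2

-- ===== PRECONDITION & SPEC =====
-- Pre_: the Python A raises IndexError on cafe[i] when cafe is shorter than f; excluded.
def Pre_safe_solution (f : List Int) (cafe : List Int) : Prop := f.length ≤ cafe.length
instance (f : List Int) (cafe : List Int) : Decidable (Pre_safe_solution f cafe) := by unfold Pre_safe_solution; infer_instance
def pvWitness_safe_solution : List Int × List Int := ([1, 2, 1, 1], [1, 0, 0, 1])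

def Spec_safe_solution (f : List Int) (cafe : List Int) (out : Int) : Prop := out = safe_solution_alt f cafe
instance (f : List Int) (cafe : List Int) (out : Int) : Decidable (Spec_safe_solution f cafe out) := by unfold Spec_safe_solution; infer_instance

-- ===== CLAIM (what is proved, stated in full; the proofs are below) =====
def Claim_equal_safe_solution : Prop := ∀ (f : List Int) (cafe : List Int), Dom_safe_solution f cafe → Pre_safe_solution f cafe → Spec_safe_solution f cafe (safe_solution f cafe)

-- ===== LEMMAS AND PROOFS =====

-- per-key contribution A sums (Counter c of a key's cafe values)
def pvF (c : PySem.Dict Int Int) : Int :=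
  c.getD 1 0 * c.getD 0 0 + PySem.Int.floordiv (c.getD 1 0 * (c.getD 1 0 - 1)) 2

def pvStepA (g : PySem.Dict Int (PySem.Dict Int Int)) (p : Int × Int) :
    PySem.Dict Int (PySem.Dict Int Int) :=
  g.modify p.1 PySem.Dict.empty (fun c => c.modify p.2 0 (· + 1))

def pvStepB (st : PySem.Dict Int (Int × Int) × Int) (p : Int × Int) :
    PySem.Dict Int (Int × Int) × Int :=
  let q := st.1.getD p.1 (0, 0)
  if p.2 = 1 then (st.1.insert p.1 (q.1 + 1, q.2), st.2 + q.1 + q.2)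
  else if p.2 = 0 then (st.1.insert p.1 (q.1, q.2 + 1), st.2 + q.1)
  else st

def pvSum (g : PySem.Dict Int (PySem.Dict Int Int)) : Int :=
  (g.items.map (fun p => pvF p.2)).sum

lemma pv_map_replace_id (k : Int) (v : PySem.Dict Int Int) :
    ∀ l : List (Int × PySem.Dict Int Int), (∀ p ∈ l, p.1 ≠ k) →
      l.map (fun p => if (p.1 == k) = true then (k, v) else p) = l := by
  intro l h
  induction l with
  | nil => rfl
  | cons a t ih =>
    simp only [List.map_cons]
    rw [if_neg (by simpa using h a (by simp)), ih (fun p hp => h p (by simp [hp]))]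

lemma pv_sum_replace (k : Int) (v : PySem.Dict Int Int) :
    ∀ l : List (Int × PySem.Dict Int Int), (l.map Prod.fst).Nodup →
      ∀ c, (k, c) ∈ l →
      ((l.map (fun p => if (p.1 == k) = true then (k, v) else p)).map (fun p => pvF p.2)).sum
        = (l.map (fun p => pvF p.2)).sum - pvF c + pvF v := by
  intro l
  induction l with
  | nil => intro _ c hc; simp at hc
  | cons a t ih =>
    intro hn c hc
    rw [List.map_cons] at hn
    obtain ⟨hnh, hnt⟩ := List.nodup_cons.mp hn
    rcases List.mem_cons.mp hc with h | h
    · subst h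
      simp only [List.map_cons]
      rw [if_pos (by simp)]
      rw [pv_map_replace_id k v t
        (fun p hp hpk => hnh (List.mem_map.mpr ⟨p, hp, hpk⟩))]
      simp only [List.sum_cons]; ring
    · have hak : a.1 ≠ k := fun hpk => hnh (List.mem_map.mpr ⟨(k, c), h, hpk.symm⟩)
      simp only [List.map_cons]
      rw [if_neg (by simpa using hak)]
      simp only [List.sum_cons, ih hnt c h]; ring

lemma pv_F_empty : pvF PySem.Dict.empty = 0 := by decide

lemma pv_sum_insert (g : PySem.Dict Int (PySem.Dict Int Int)) (k : Int)
    (v : PySem.Dict Int Int) (hn : g.keys.Nodup) :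
    pvSum (g.insert k v) = pvSum g - pvF (g.getD k PySem.Dict.empty) + pvF v := by
  unfold pvSum
  cases hc : g.contains k with
  | true =>
    obtain ⟨c, hg⟩ : ∃ c, g.get? k = some c := by
      have := PySem.Dict.contains_eq_isSome_get? g k
      rw [hc] at this
      exact Option.isSome_iff_exists.mp this.symm
    rw [PySem.Dict.items_insert_of_contains g v hc,
      PySem.Dict.getD_of_get?_eq_some g PySem.Dict.empty hg]
    exact pv_sum_replace k v g.items hn c (PySem.Dict.mem_items_of_get?_eq_some g hg)
  | false =>
    rw [PySem.Dict.items_insert_of_not_contains g v hc,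
      PySem.Dict.getD_of_not_contains g PySem.Dict.empty hc, pv_F_empty]
    simp

lemma pv_floordiv_shift (x s : Int) :
    PySem.Int.floordiv (x + 2 * s) 2 = PySem.Int.floordiv x 2 + s := by
  rw [PySem.Int.floordiv_eq_ediv_of_pos (by norm_num),
    PySem.Int.floordiv_eq_ediv_of_pos (by norm_num)]
  omega

-- one step preserves the relation between A's graph and B's running state
lemma pv_inv_step (g : PySem.Dict Int (PySem.Dict Int Int)) (d : PySem.Dict Int (Int × Int))
    (res : Int) (k s : Int) (hn : g.keys.Nodup)
    (hd : ∀ k', d.getD k' (0, 0) =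
      ((g.getD k' PySem.Dict.empty).getD 1 0, (g.getD k' PySem.Dict.empty).getD 0 0))
    (hres : res = pvSum g) :
    (pvStepA g (k, s)).keys.Nodup ∧
    (∀ k', (pvStepB (d, res) (k, s)).1.getD k' (0, 0) =
      (((pvStepA g (k, s)).getD k' PySem.Dict.empty).getD 1 0,
       ((pvStepA g (k, s)).getD k' PySem.Dict.empty).getD 0 0)) ∧
    (pvStepB (d, res) (k, s)).2 = pvSum (pvStepA g (k, s)) := by
  set c := g.getD k PySem.Dict.empty with hc
  have hq : d.getD k (0, 0) = (c.getD 1 0, c.getD 0 0) := hd k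
  have hstepA : pvStepA g (k, s) = g.insert k (c.insert s (c.getD s 0 + 1)) := rfl
  set c' := c.insert s (c.getD s 0 + 1) with hc'
  have hn' : (pvStepA g (k, s)).keys.Nodup := by
    rw [hstepA]; exact PySem.Dict.nodup_keys_insert _ _ _ hn
  have hsum : pvSum (pvStepA g (k, s)) = pvSum g - pvF c + pvF c' := by
    rw [hstepA, pv_sum_insert g k c' hn, ← hc]
  refine ⟨hn', ?_, ?_⟩
  · intro k'
    by_cases hk' : k' = k
    · subst hk'
      rw [hstepA, PySem.Dict.getD_insert_self]
      by_cases hs1 : s = 1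
      · subst hs1
        have hB : pvStepB (d, res) (k', 1) =
            (d.insert k' (c.getD 1 0 + 1, c.getD 0 0), res + c.getD 1 0 + c.getD 0 0) := by
          simp [pvStepB, hq]
        rw [hB, PySem.Dict.getD_insert_self, hc',
          PySem.Dict.getD_insert_self, PySem.Dict.getD_insert_of_ne c _ _ (by norm_num)]
      · by_cases hs0 : s = 0
        · subst hs0
          have hB : pvStepB (d, res) (k', 0) =
              (d.insert k' (c.getD 1 0, c.getD 0 0 + 1), res + c.getD 1 0) := by
            simp [pvStepB, hq]
          rw [hB, PySem.Dict.getD_insert_self, hc',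
            PySem.Dict.getD_insert_self, PySem.Dict.getD_insert_of_ne c _ _ (by norm_num)]
        · have hB : pvStepB (d, res) (k', s) = (d, res) := by
            simp [pvStepB, hs1, hs0]
          rw [hB, hq, hc',
            PySem.Dict.getD_insert_of_ne c _ _ (fun h => hs1 h.symm),
            PySem.Dict.getD_insert_of_ne c _ _ (fun h => hs0 h.symm)]
    · have hBd : (pvStepB (d, res) (k, s)).1.getD k' (0, 0) = d.getD k' (0, 0) := by
        by_cases hs1 : s = 1
        · subst hs1
          show (d.insert k _).getD k' (0, 0) = d.getD k' (0, 0)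
          exact PySem.Dict.getD_insert_of_ne d _ _ hk'
        · by_cases hs0 : s = 0
          · subst hs0
            show (d.insert k _).getD k' (0, 0) = d.getD k' (0, 0)
            exact PySem.Dict.getD_insert_of_ne d _ _ hk'
          · simp [pvStepB, hs1, hs0]
      rw [hBd, hstepA, PySem.Dict.getD_insert_of_ne g _ _ hk']
      exact hd k'
  · rw [hsum]
    by_cases hs1 : s = 1
    · subst hs1
      have hB : (pvStepB (d, res) (k, 1)).2 = res + c.getD 1 0 + c.getD 0 0 := by
        simp [pvStepB, hq]
      rw [hB, hres]
      have h1 : c'.getD 1 0 = c.getD 1 0 + 1 := by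
        rw [hc']; exact PySem.Dict.getD_insert_self _ _ _ _
      have h0 : c'.getD 0 0 = c.getD 0 0 := by
        rw [hc']; exact PySem.Dict.getD_insert_of_ne c _ _ (by norm_num)
      unfold pvF
      rw [h1, h0]
      have harg : (c.getD 1 0 + 1) * (c.getD 1 0 + 1 - 1) =
          c.getD 1 0 * (c.getD 1 0 - 1) + 2 * c.getD 1 0 := by ring
      rw [harg, pv_floordiv_shift]; ring
    · by_cases hs0 : s = 0
      · subst hs0
        have hB : (pvStepB (d, res) (k, 0)).2 = res + c.getD 1 0 := by
          simp [pvStepB, hq]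
        rw [hB, hres]
        have h1 : c'.getD 1 0 = c.getD 1 0 := by
          rw [hc']; exact PySem.Dict.getD_insert_of_ne c _ _ (by norm_num)
        have h0 : c'.getD 0 0 = c.getD 0 0 + 1 := by
          rw [hc']; exact PySem.Dict.getD_insert_self _ _ _ _
        unfold pvF
        rw [h1, h0]; ring
      · have hB : (pvStepB (d, res) (k, s)).2 = res := by
          simp [pvStepB, hs1, hs0]
        rw [hB, hres]
        have h1 : c'.getD 1 0 = c.getD 1 0 := by
          rw [hc']; exact PySem.Dict.getD_insert_of_ne c _ _ (fun h => hs1 h.symm)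
        have h0 : c'.getD 0 0 = c.getD 0 0 := by
          rw [hc']; exact PySem.Dict.getD_insert_of_ne c _ _ (fun h => hs0 h.symm)
        unfold pvF
        rw [h1, h0]; ring

lemma pv_main : ∀ (zs : List (Int × Int)) (g : PySem.Dict Int (PySem.Dict Int Int))
    (d : PySem.Dict Int (Int × Int)) (res : Int),
    g.keys.Nodup →
    (∀ k, d.getD k (0, 0) =
      ((g.getD k PySem.Dict.empty).getD 1 0, (g.getD k PySem.Dict.empty).getD 0 0)) →
    res = pvSum g →
    (zs.foldl pvStepB (d, res)).2 = pvSum (zs.foldl pvStepA g) := by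
  intro zs
  induction zs with
  | nil => intro g d res _ _ hres; simpa using hres
  | cons p t ih =>
    intro g d res hn hd hres
    obtain ⟨k, s⟩ := p
    simp only [List.foldl_cons]
    obtain ⟨hn', hd', hres'⟩ := pv_inv_step g d res k s hn hd hres
    have hpair : pvStepB (d, res) (k, s) =
        ((pvStepB (d, res) (k, s)).1, (pvStepB (d, res) (k, s)).2) := rfl
    rw [hpair]
    exact ih (pvStepA g (k, s)) _ _ hn' hd' hres'

-- ===== VERDICT (by name: the statement is the Claim_ definition above) =====
theorem safe_solution_spec : Claim_equal_safe_solution := by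
  intro f cafe _ _
  unfold Spec_safe_solution safe_solution safe_solution_alt
  have hzs : ∀ (T : Type) (step : T → Int × Int → T) (init : T),
      ((PySem.List.pyRange 0 (f.length : Int) 1).map
        (fun i => (PySem.List.pyGetD f i 0, PySem.List.pyGetD cafe i 0))).foldl step init =
      (PySem.List.pyRange 0 (f.length : Int) 1).foldl
        (fun acc i => step acc (PySem.List.pyGetD f i 0, PySem.List.pyGetD cafe i 0)) init := by
    intro T step init; rw [List.foldl_map]
  set zs := (PySem.List.pyRange 0 (f.length : Int) 1).map
    (fun i => (PySem.List.pyGetD f i 0, PySem.List.pyGetD cafe i 0)) with hzsdef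
  have hA : (PySem.List.pyRange 0 (f.length : Int) 1).foldl
      (fun g i =>
        let fra := PySem.List.pyGetD f i 0
        let safe := PySem.List.pyGetD cafe i 0
        g.modify fra PySem.Dict.empty (fun c => c.modify safe 0 (· + 1)))
      PySem.Dict.empty = zs.foldl pvStepA PySem.Dict.empty := by
    rw [hzsdef, hzs]; rfl
  have hB : (PySem.List.pyRange 0 (f.length : Int) 1).foldl
      (fun st i =>
        let s := PySem.List.pyGetD cafe i 0
        let p := st.1.getD (PySem.List.pyGetD f i 0) (0, 0)
        if s = 1 then (st.1.insert (PySem.List.pyGetD f i 0) (p.1 + 1, p.2), st.2 + p.1 + p.2)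
        else if s = 0 then (st.1.insert (PySem.List.pyGetD f i 0) (p.1, p.2 + 1), st.2 + p.1)
        else st)
      ((PySem.Dict.empty : PySem.Dict Int (Int × Int)), (0 : Int)) =
      zs.foldl pvStepB (PySem.Dict.empty, 0) := by
    rw [hzsdef, hzs]; rfl
  rw [hA, hB]
  have hvals : ∀ g : PySem.Dict Int (PySem.Dict Int Int),
      g.values.foldl
        (fun res count =>
          res + (count.getD 1 0 * count.getD 0 0 +
            PySem.Int.floordiv (count.getD 1 0 * (count.getD 1 0 - 1)) 2)) 0 = pvSum g := by
    intro g
    have hv : g.values = g.items.map Prod.snd := rfl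
    rw [hv, PySem.List.foldl_add, List.map_map, zero_add]
    rfl
  rw [hvals]
  exact (pv_main zs PySem.Dict.empty PySem.Dict.empty 0 PySem.Dict.nodup_keys_empty
    (fun k => rfl) rfl).symm
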